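-- pv_equiv track=rewrite | github.com/Karna-Balaji-07/DSA_Sheet | Sliding window/1343. Number of Sub-arrays of Size K and Average Greater than or Equal to Threshold.py | solutions1
-- ===== SOURCE A (Python) =====
-- def solutions1(arr,k, threshold):
--     n = len(arr)
--     count = 0
--     for i in range(n-k+1):
--         sums = sum(arr[i:i+k])
--         avg = sums//k
--         if avg >= threshold:
--             count += 1
--
--     return count
-- ===== SOURCE B (Python) =====
-- def solutions1(arr, k, threshold):
--     need = k * threshold
--     s = sum(arr[:k])
--     count = 1 if len(arr) >= k and s >= need else 0
--     for i in range(k, len(arr)):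
--         s += arr[i] - arr[i - k]
--         if s >= need:
--             count += 1
--     return count
-- ===== Notes on version B (the rewrite author's own statement) =====
-- stated objective: faster
-- what changed: Replaced the per-window re-summation sum(arr[i:i+k]) by a sliding window that maintains the running window sum incrementally, and compares s >= k*threshold instead of dividing each window sum.
-- outside the precondition, e.g. on solutions1([1, 2], -1, 0): A returns 3, B raises IndexError
import Mathlib
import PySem

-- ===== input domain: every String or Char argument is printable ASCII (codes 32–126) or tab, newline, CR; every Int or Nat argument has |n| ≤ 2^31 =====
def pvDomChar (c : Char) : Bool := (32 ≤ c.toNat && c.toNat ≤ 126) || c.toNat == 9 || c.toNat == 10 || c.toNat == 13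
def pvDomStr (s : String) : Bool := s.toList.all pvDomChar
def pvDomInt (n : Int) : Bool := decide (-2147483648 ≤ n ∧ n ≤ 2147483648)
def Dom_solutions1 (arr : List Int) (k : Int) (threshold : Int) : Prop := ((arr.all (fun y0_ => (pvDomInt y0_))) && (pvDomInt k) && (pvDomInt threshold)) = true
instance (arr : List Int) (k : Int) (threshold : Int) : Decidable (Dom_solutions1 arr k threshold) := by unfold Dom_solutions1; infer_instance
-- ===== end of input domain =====

-- B replaces A's per-window re-summation by a sliding window with an incremental running sum
-- (O(n) instead of O(n*k)), comparing the window sum against k*threshold instead of dividing.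

-- ===== PORT A =====
def solutions1 (arr : List Int) (k : Int) (threshold : Int) : Int :=
  let n : Int := arr.length
  (PySem.List.pyRange 0 (n - k + 1) 1).foldl
    (fun count i =>
      let sums := (PySem.List.slice arr (some i) (some (i + k))).sum
      let avg := PySem.Int.floordiv sums k
      if avg ≥ threshold then count + 1 else count) 0

-- ===== PORT B =====
-- arr[i] and arr[i-k] are ported with pyGetD; under Pre_ (k ≥ 1) every index i ∈ range(k, n)
-- is in range, so the default is unreachable and the port is exact there.
def solutions1_alt (arr : List Int) (k : Int) (threshold : Int) : Int :=
  let need := k * threshold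
  let n : Int := arr.length
  let s0 := (PySem.List.slice arr none (some k)).sum
  let c0 : Int := if n ≥ k ∧ s0 ≥ need then 1 else 0
  let r := (PySem.List.pyRange k n 1).foldl
    (fun (st : Int × Int) i =>
      let s := st.2 + PySem.List.pyGetD arr i 0 - PySem.List.pyGetD arr (i - k) 0
      (if s ≥ need then st.1 + 1 else st.1, s)) (c0, s0)
  r.1

-- ===== PRECONDITION & SPEC =====
-- Pre_ restricts to the task's natural domain k ≥ 1: at k = 0 A raises ZeroDivisionError, and for
-- k < 0 A's returned value is an accident of Python's negative slice-bound wraparound while B's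
-- sliding window itself raises IndexError there.
def Pre_solutions1 (arr : List Int) (k : Int) (threshold : Int) : Prop := 1 ≤ k
instance (arr : List Int) (k : Int) (threshold : Int) : Decidable (Pre_solutions1 arr k threshold) := by unfold Pre_solutions1; infer_instance
def pvWitness_solutions1 : List Int × Int × Int := ([2, 2, 2, 2, 5, 5, 5, 8], 3, 4)

def Spec_solutions1 (arr : List Int) (k : Int) (threshold : Int) (out : Int) : Prop := out = solutions1_alt arr k threshold
instance (arr : List Int) (k : Int) (threshold : Int) (out : Int) : Decidable (Spec_solutions1 arr k threshold out) := by unfold Spec_solutions1; infer_instance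

-- ===== CLAIM (what is proved, stated in full; the proofs are below) =====
def Claim_equal_solutions1 : Prop := ∀ (arr : List Int) (k : Int) (threshold : Int), Dom_solutions1 arr k threshold → Pre_solutions1 arr k threshold → Spec_solutions1 arr k threshold (solutions1 arr k threshold)

-- ===== LEMMAS AND PROOFS =====

-- window sum: sum of arr[j : j+m] (as drop/take)
def Wsum (arr : List Int) (m j : Nat) : Int := ((arr.drop j).take m).sum

theorem sum_window (arr : List Int) (m j : Nat) (h : j + m ≤ arr.length) :
    Wsum arr m j = ∑ r ∈ Finset.range m, arr.getD (j + r) 0 := by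
  induction m generalizing j with
  | zero => simp [Wsum]
  | succ m ih =>
    have hj : j < arr.length := by omega
    have hdrop : arr.drop j = arr[j] :: arr.drop (j + 1) := List.drop_eq_getElem_cons hj
    have hg : arr.getD j 0 = arr[j] := by
      rw [List.getD_eq_getElem?_getD, List.getElem?_eq_getElem hj]; rfl
    have h1 : Wsum arr (m + 1) j = arr.getD j 0 + Wsum arr m (j + 1) := by
      unfold Wsum
      rw [hdrop, List.take_succ_cons, List.sum_cons, hg]
    rw [h1, ih (j + 1) (by omega), Finset.sum_range_succ']
    have hsh : ∀ r, j + 1 + r = j + (r + 1) := fun r => by omega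
    simp only [hsh, add_zero]
    ring

theorem slide (arr : List Int) (k' j : Nat) (h : j + 1 + k' ≤ arr.length) :
    Wsum arr k' j + arr.getD (j + k') 0 - arr.getD j 0 = Wsum arr k' (j + 1) := by
  rw [sum_window arr k' j (by omega), sum_window arr k' (j + 1) (by omega)]
  have e1 := Finset.sum_range_succ' (fun r => arr.getD (j + r) 0) k'
  have e2 := Finset.sum_range_succ (fun r => arr.getD (j + r) 0) k'
  simp only [add_zero] at e1
  have hsh : ∀ r, j + 1 + r = j + (r + 1) := fun r => by omega
  simp only [hsh]
  omega

-- B's loop invariant: after processing i = k, …, b-1 the state is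
-- (c + #{ r < b-k | need ≤ Wsum (r+1) }, Wsum (b-k)).
theorem Bloop (arr : List Int) (k' : Nat) (need : Int) (hk : 1 ≤ k') (b : Nat)
    (hb1 : k' ≤ b) (hb2 : b ≤ arr.length) (c : Int) :
    (PySem.List.pyRange (k' : Int) (b : Int) 1).foldl
      (fun (st : Int × Int) i =>
        let s := st.2 + PySem.List.pyGetD arr i 0 - PySem.List.pyGetD arr (i - (k' : Int)) 0
        (if s ≥ need then st.1 + 1 else st.1, s)) (c, Wsum arr k' 0)
    = (c + (((List.range (b - k')).countP (fun r => decide (need ≤ Wsum arr k' (r + 1)))) : Int),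
       Wsum arr k' (b - k')) := by
  induction b, hb1 using Nat.le_induction with
  | base =>
    rw [PySem.List.pyRange_one_eq_nil (by omega)]
    simp
  | succ b hb ih =>
    have hbn : b < arr.length := by omega
    have hsplit : (PySem.List.pyRange (k' : Int) ((b + 1 : Nat) : Int) 1)
        = PySem.List.pyRange (k' : Int) (b : Int) 1 ++ [(b : Int)] := by
      push_cast
      exact PySem.List.pyRange_one_succ_right (by exact_mod_cast hb)
    rw [hsplit, List.foldl_append, ih (by omega)]
    have hcast : (b : Int) - (k' : Int) = ((b - k' : Nat) : Int) := by
      push_cast [Nat.cast_sub hb]; ring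
    have hget1 : PySem.List.pyGetD arr (b : Int) 0 = arr.getD b 0 := by
      simp [PySem.List.pyGetD_natCast]
    have hget2 : PySem.List.pyGetD arr ((b : Int) - (k' : Int)) 0 = arr.getD (b - k') 0 := by
      rw [hcast]; simp [PySem.List.pyGetD_natCast]
    have hslide : Wsum arr k' (b - k') + arr.getD (b - k' + k') 0 - arr.getD (b - k') 0
        = Wsum arr k' (b - k' + 1) := slide arr k' (b - k') (by omega)
    have hbk : b - k' + k' = b := by omega
    have hcnt : (List.range (b + 1 - k')).countP (fun r => decide (need ≤ Wsum arr k' (r + 1)))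
        = (List.range (b - k')).countP (fun r => decide (need ≤ Wsum arr k' (r + 1)))
          + (if need ≤ Wsum arr k' (b - k' + 1) then 1 else 0) := by
      have hbs : b + 1 - k' = (b - k') + 1 := by omega
      rw [hbs, List.range_succ, List.countP_append]
      simp
    simp only [List.foldl_cons, List.foldl_nil, hget1, hget2]
    rw [hbk] at hslide
    rw [hslide]
    have hs : b + 1 - k' = (b - k') + 1 := by omega
    rw [hcnt, hs]
    by_cases hcond : need ≤ Wsum arr k' (b - k' + 1) <;> simp [hcond, ge_iff_le] <;> ring

-- A counts j ∈ range(n-k+1) with threshold*k ≤ Wsum j.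
theorem A_char (arr : List Int) (k' : Nat) (t : Int) (hk : 1 ≤ k') :
    solutions1 arr (k' : Int) t
      = (((List.range (((arr.length : Int) - (k' : Int) + 1).toNat)).countP
          (fun j => decide (t * (k' : Int) ≤ Wsum arr k' j))) : Int) := by
  show ((PySem.List.pyRange 0 ((arr.length : Int) - (k' : Int) + 1) 1).foldl
      (fun count i =>
        if PySem.Int.floordiv (PySem.List.slice arr (some i) (some (i + (k' : Int)))).sum (k' : Int) ≥ t
        then count + 1 else count) 0) = _
  rw [PySem.List.pyRange_one, List.foldl_map]
  have hfun : (fun (x : Int) (y : Nat) =>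
        if PySem.Int.floordiv
            (PySem.List.slice arr (some (0 + (y : Int))) (some (0 + (y : Int) + (k' : Int)))).sum
            (k' : Int) ≥ t
        then x + 1 else x)
      = (fun (c : Int) (j : Nat) => if t * (k' : Int) ≤ Wsum arr k' j then c + 1 else c) := by
    funext c j
    (
      simp only [zero_add]
      rw [PySem.List.slice_natCast_add arr j k']
      have hcnd := PySem.Int.le_floordiv_iff_mul_le
        (a := ((arr.drop j).take k').sum) (q := t)
        (show (0 : Int) < (k' : Int) by exact_mod_cast hk)
      simp only [ge_iff_le, Wsum]
      by_cases h : t * (k' : Int) ≤ ((arr.drop j).take k').sum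
      · rw [if_pos (hcnd.mpr h), if_pos h]
      · rw [if_neg (fun hc => h (hcnd.mp hc)), if_neg h])
  rw [hfun, PySem.List.foldl_ite_add_one]
  simp only [sub_zero, zero_add]

-- B is the first-window test plus the counts accumulated by the sliding loop.
theorem B_char (arr : List Int) (k' : Nat) (t : Int) (hk : 1 ≤ k') :
    solutions1_alt arr (k' : Int) t
      = (if k' ≤ arr.length ∧ t * (k' : Int) ≤ Wsum arr k' 0 then 1 else 0)
        + (((List.range (arr.length - k')).countP
            (fun r => decide (t * (k' : Int) ≤ Wsum arr k' (r + 1)))) : Int) := by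
  have hs0 : (PySem.List.slice arr none (some ((k' : Nat) : Int))).sum = Wsum arr k' 0 := by
    rw [PySem.List.slice_to_natCast]
    simp [Wsum]
  show ((PySem.List.pyRange ((k' : Nat) : Int) ((arr.length : Nat) : Int) 1).foldl
      (fun (st : Int × Int) i =>
        let s := st.2 + PySem.List.pyGetD arr i 0 - PySem.List.pyGetD arr (i - (k' : Int)) 0
        (if s ≥ (k' : Int) * t then st.1 + 1 else st.1, s))
      ((if ((arr.length : Nat) : Int) ≥ (k' : Int) ∧
            (PySem.List.slice arr none (some ((k' : Nat) : Int))).sum ≥ (k' : Int) * t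
        then 1 else 0),
       (PySem.List.slice arr none (some ((k' : Nat) : Int))).sum)).1 = _
  rw [hs0]
  by_cases hle : k' ≤ arr.length
  · rw [Bloop arr k' ((k' : Int) * t) hk arr.length hle le_rfl]
    have hcl : ((k' : Int) ≤ (arr.length : Int)) = (k' ≤ arr.length) := by
      simp [Nat.cast_le]
    simp only [ge_iff_le, mul_comm ((k' : Nat) : Int) t, hcl]
  · have hnil : PySem.List.pyRange ((k' : Nat) : Int) ((arr.length : Nat) : Int) 1 = [] :=
      PySem.List.pyRange_one_eq_nil (by exact_mod_cast Nat.le_of_lt (Nat.lt_of_not_le hle))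
    have h0 : arr.length - k' = 0 := by omega
    have hnlt : ¬ ((k' : Int) ≤ (arr.length : Int)) := by exact_mod_cast hle
    rw [hnil]
    simp [h0, hle, hnlt]

theorem countP_range_succ_shift (m : Nat) (p : Nat → Bool) :
    (List.range (m + 1)).countP p
      = (if p 0 then 1 else 0) + (List.range m).countP (fun r => p (r + 1)) := by
  rw [List.range_succ_eq_map, List.countP_cons, List.countP_map]
  simp only [Function.comp_def, Nat.succ_eq_add_one]
  omega

-- ===== VERDICT (by name: the statement is the Claim_ definition above) =====
theorem solutions1_spec : Claim_equal_solutions1 := by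
  intro arr k threshold _ hpre
  unfold Spec_solutions1
  unfold Pre_solutions1 at hpre
  obtain ⟨k', rfl⟩ : ∃ n : Nat, k = (n : Int) :=
    ⟨k.toNat, (Int.toNat_of_nonneg (by omega)).symm⟩
  have hk1 : 1 ≤ k' := by exact_mod_cast hpre
  rw [A_char arr k' threshold hk1, B_char arr k' threshold hk1]
  by_cases hle : k' ≤ arr.length
  · have hM : (((arr.length : Int) - (k' : Int) + 1)).toNat = arr.length - k' + 1 := by omega
    rw [hM, countP_range_succ_shift]
    push_cast
    by_cases h0 : threshold * (k' : Int) ≤ Wsum arr k' 0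
    · simp [h0, hle]
    · simp [h0]
  · have hM : (((arr.length : Int) - (k' : Int) + 1)).toNat = 0 := by omega
    have h0 : arr.length - k' = 0 := by omega
    rw [hM, h0]
    simp [hle]
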